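-- pv_equiv track=rewrite | github.com/irregularunit/bot | src/__init__.py | _generate_serial_number
-- ===== SOURCE A (Python) =====
-- from string import ascii_letters, digits
--
-- BASE62 = digits + ascii_letters
--
-- def _generate_serial_number(major: int, minor: int) -> str:
--     def b62_encode(number: int, alphabet: str) -> str:
--         if number == 0:
--             return alphabet[0]
--
--         base = len(alphabet)
--         digits: list[str] = []
--
--         while number:
--             number, remainder = divmod(number, base)
--             digits.append(alphabet[remainder])
--
--         return "".join(reversed(digits))
--
--     return b62_encode(major * 100 + minor, BASE62)
-- ===== SOURCE B (Python) =====
-- from string import ascii_letters, digits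
--
-- BASE62 = digits + ascii_letters
--
-- def _generate_serial_number(major: int, minor: int) -> str:
--     def b62_encode(number: int, alphabet: str) -> str:
--         base = len(alphabet)
--         if number < base:
--             return alphabet[number]
--         return b62_encode(number // base, alphabet) + alphabet[number % base]
--
--     return b62_encode(major * 100 + minor, BASE62)
-- ===== Notes on version B (the rewrite author's own statement) =====
-- stated objective: simpler
-- what changed: Replaces the accumulate-digits-then-reverse while loop with a direct recursion on the quotient that emits digits in forward order (no list, no reversal); the explicit zero branch collapses into the single-digit base case.
import Mathlib
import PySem

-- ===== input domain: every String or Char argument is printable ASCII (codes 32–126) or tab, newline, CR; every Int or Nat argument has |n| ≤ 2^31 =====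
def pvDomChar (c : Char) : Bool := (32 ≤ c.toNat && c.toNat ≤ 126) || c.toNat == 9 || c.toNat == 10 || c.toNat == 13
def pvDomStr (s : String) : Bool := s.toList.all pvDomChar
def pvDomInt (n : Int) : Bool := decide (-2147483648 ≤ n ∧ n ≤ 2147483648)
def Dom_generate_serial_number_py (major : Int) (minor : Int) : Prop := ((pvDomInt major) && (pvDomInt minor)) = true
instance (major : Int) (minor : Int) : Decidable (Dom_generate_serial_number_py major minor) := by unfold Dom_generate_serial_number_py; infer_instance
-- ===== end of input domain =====

-- B replaces A's accumulate-digits-then-reverse loop by a forward recursion on the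
-- quotient (simpler: no digit list, no reversal); return value equivalence on Pre_.

-- BASE62 = digits + ascii_letters, as a list of characters
def pvAlph : List Char :=
  "0123456789abcdefghijklmnopqrstuvwxyzABCDEFGHIJKLMNOPQRSTUVWXYZ".toList

-- ===== PORT A =====
-- A's while loop: appends alphabet[number % 62] and continues with number // 62.
-- Under Pre_ the encoded number is nonnegative (A loops forever on negatives),
-- so the loop variable is carried as a Nat; Python's floordiv/mod agree with
-- Nat division on nonnegatives, where this port is exact.
def pvLoopA : Nat → List Char → List Char
  | 0, digs => digs
  | n+1, digs => pvLoopA ((n+1) / 62) (digs ++ [pvAlph.getD ((n+1) % 62) ' '])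
decreasing_by exact Nat.div_lt_self (Nat.succ_pos n) (by omega)

def generate_serial_number_py (major : Int) (minor : Int) : String :=
  let number : Int := major * 100 + minor
  if number = 0 then String.mk [pvAlph.getD 0 ' ']
  else String.mk ((pvLoopA number.toNat []).reverse)

-- ===== PORT B =====
-- B's recursion: single digit when number < 62, else recurse on the quotient
-- and append the last digit. Same nonnegative carrier as above.
def pvRecB (n : Nat) : List Char :=
  if n < 62 then [pvAlph.getD n ' ']
  else pvRecB (n / 62) ++ [pvAlph.getD (n % 62) ' ']
decreasing_by exact Nat.div_lt_self (by omega) (by omega)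

def generate_serial_number_py_alt (major : Int) (minor : Int) : String :=
  String.mk (pvRecB (major * 100 + minor).toNat)

-- ===== PRECONDITION & SPEC =====
-- Pre_ excludes negative serial numbers: there A's while loop never terminates
-- (divmod keeps the number negative), so A returns on exactly these inputs.
def Pre_generate_serial_number_py (major : Int) (minor : Int) : Prop :=
  0 ≤ major * 100 + minor
instance (major : Int) (minor : Int) : Decidable (Pre_generate_serial_number_py major minor) := by
  unfold Pre_generate_serial_number_py; infer_instance

def pvWitness_generate_serial_number_py : Int × Int := (1, 2)

def Spec_generate_serial_number_py (major : Int) (minor : Int) (out : String) : Prop :=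
  out = generate_serial_number_py_alt major minor
instance (major : Int) (minor : Int) (out : String) : Decidable (Spec_generate_serial_number_py major minor out) := by
  unfold Spec_generate_serial_number_py; infer_instance

-- ===== CLAIM =====
def Claim_equal_generate_serial_number_py : Prop :=
  ∀ (major : Int) (minor : Int), Dom_generate_serial_number_py major minor →
    Pre_generate_serial_number_py major minor →
    Spec_generate_serial_number_py major minor (generate_serial_number_py major minor)

-- ===== LEMMAS AND PROOFS =====
theorem pvLoopA_append (n : Nat) (digs : List Char) :
    pvLoopA n digs = digs ++ pvLoopA n [] := by
  induction n using Nat.strong_induction_on generalizing digs with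
  | _ n ih =>
    match n with
    | 0 => simp [pvLoopA]
    | m+1 =>
      rw [pvLoopA, ih ((m+1)/62) (Nat.div_lt_self (Nat.succ_pos m) (by omega)) (digs ++ [pvAlph.getD ((m+1) % 62) ' ']),
          pvLoopA]
      simp only [List.nil_append]
      rw [ih ((m+1)/62) (Nat.div_lt_self (Nat.succ_pos m) (by omega)) [pvAlph.getD ((m+1) % 62) ' ']]
      simp

theorem pvLoopA_reverse_eq (n : Nat) (h : 0 < n) :
    (pvLoopA n []).reverse = pvRecB n := by
  induction n using Nat.strong_induction_on with
  | _ n ih =>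
    match n, h with
    | m+1, _ =>
      rw [pvLoopA, pvLoopA_append]
      by_cases hlt : m+1 < 62
      · have hq : (m+1) / 62 = 0 := Nat.div_eq_of_lt hlt
        have hr : (m+1) % 62 = m+1 := Nat.mod_eq_of_lt hlt
        rw [hq, hr]
        simp [pvLoopA, pvRecB, hlt]
      · have hqpos : 0 < (m+1) / 62 := Nat.div_pos (by omega) (by omega)
        rw [List.nil_append, List.reverse_append,
            ih ((m+1)/62) (Nat.div_lt_self (Nat.succ_pos m) (by omega)) hqpos]
        conv_rhs => rw [pvRecB]
        simp [hlt]

-- ===== VERDICT =====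
theorem generate_serial_number_py_spec : Claim_equal_generate_serial_number_py := by
  intro major minor _ hpre
  unfold Spec_generate_serial_number_py generate_serial_number_py generate_serial_number_py_alt
  set n : Int := major * 100 + minor with hn
  by_cases h0 : n = 0
  · rw [if_pos h0, h0]
    rw [show ((0 : Int).toNat) = 0 from rfl, pvRecB]
    norm_num
  · have hpos : 0 < n.toNat := by
      have : 0 < n := lt_of_le_of_ne hpre (Ne.symm h0)
      omega
    rw [if_neg h0, pvLoopA_reverse_eq n.toNat hpos]
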